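-- pv_equiv track=rewrite | github.com/Juliancamilo97/Caracter-repetidos | repetidos.py | contar_caracteres_repetidos
-- ===== SOURCE A (Python) =====
-- def contar_caracteres_repetidos(cadena: str)->int:
--     t=tuple(cadena)
--     most_common_count=0
--     lista=[]
--     lista1=[]
--     for i in range(len(t)):
--             lista.append(t[i])
--     for elemento in lista:
--         if lista.count(elemento) > 1:
--             lista1.append(elemento)
--     if lista1==[]:
--         most_common_count=0
--     else:
--         for letter in lista1:
--             count = lista1.count(letter)
--             if count > most_common_count:
--                 most_common_count = count
--     return most_common_count
-- ===== SOURCE B (Python) =====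
-- def contar_caracteres_repetidos(cadena: str) -> int:
--     counts = {}
--     for ch in cadena:
--         counts[ch] = counts.get(ch, 0) + 1
--     best = 0
--     for v in counts.values():
--         if v > 1 and v > best:
--             best = v
--     return best
-- ===== Notes on version B (the rewrite author's own statement) =====
-- stated objective: faster
-- what changed: Replaces the quadratic repeated list.count scans (over the copied list and again over the repeated-elements list) with a single-pass dictionary of character counts followed by one pass over the distinct counts.
import Mathlib
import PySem

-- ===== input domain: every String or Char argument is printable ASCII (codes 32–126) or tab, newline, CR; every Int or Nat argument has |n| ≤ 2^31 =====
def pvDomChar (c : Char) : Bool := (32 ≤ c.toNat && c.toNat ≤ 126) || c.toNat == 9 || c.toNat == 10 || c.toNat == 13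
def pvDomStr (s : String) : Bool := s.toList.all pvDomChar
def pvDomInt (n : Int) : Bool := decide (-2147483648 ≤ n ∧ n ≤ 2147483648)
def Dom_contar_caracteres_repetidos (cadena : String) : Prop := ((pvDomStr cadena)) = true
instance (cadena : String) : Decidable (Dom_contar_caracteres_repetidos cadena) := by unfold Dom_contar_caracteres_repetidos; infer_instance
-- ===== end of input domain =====

-- B replaces A's repeated quadratic list.count scans with one counting-dict pass
-- plus one pass over the distinct counts (objective: faster, O(n^2) → O(n)).

-- ===== PORT A =====
-- t[i] never raises (i ranges over range(len(t))); pyGetD's default ' ' is unreachable.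
def contar_caracteres_repetidos (cadena : String) : Int :=
  let t := cadena.toList
  let most_common_count : Int := 0
  let lista : List Char :=
    (PySem.List.pyRange 0 (PySem.List.len t) 1).foldl
      (fun l i => l ++ [PySem.List.pyGetD t i ' ']) []
  let lista1 : List Char :=
    lista.foldl (fun l1 e => if PySem.List.count lista e > 1 then l1 ++ [e] else l1) []
  if lista1 = [] then 0
  else
    lista1.foldl
      (fun m letter =>
        let count : Int := (PySem.List.count lista1 letter : Int)
        if count > m then count else m)
      most_common_count

-- ===== PORT B =====
def contar_caracteres_repetidos_alt (cadena : String) : Int :=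
  let counts : PySem.Dict Char Int :=
    cadena.toList.foldl (fun d ch => d.insert ch (d.getD ch 0 + 1)) PySem.Dict.empty
  counts.values.foldl (fun best v => if v > 1 ∧ v > best then v else best) 0

-- ===== PRECONDITION & SPEC =====
def Spec_contar_caracteres_repetidos (cadena : String) (out : Int) : Prop := out = contar_caracteres_repetidos_alt cadena
instance (cadena : String) (out : Int) : Decidable (Spec_contar_caracteres_repetidos cadena out) := by unfold Spec_contar_caracteres_repetidos; infer_instance

-- ===== CLAIM (what is proved, stated in full; the proofs are below) =====
def Claim_equal_contar_caracteres_repetidos : Prop := ∀ (cadena : String), Dom_contar_caracteres_repetidos cadena → Spec_contar_caracteres_repetidos cadena (contar_caracteres_repetidos cadena)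

-- ===== LEMMAS AND PROOFS =====

-- running max of a projection, written as A's and B's loops write it
def pvMaxOf (f : Char → Int) (l : List Char) : Int :=
  l.foldl (fun m x => max m (f x)) 0

theorem pvMaxOf_nonneg (f : Char → Int) (l : List Char) : 0 ≤ pvMaxOf f l :=
  (PySem.List.le_foldl_max_int l f 0).1

theorem pvMaxOf_le (f : Char → Int) (l : List Char) {x : Char} (hx : x ∈ l) :
    f x ≤ pvMaxOf f l :=
  (PySem.List.le_foldl_max_int l f 0).2 x hx

theorem pvMaxOf_mem (f : Char → Int) (l : List Char) :
    pvMaxOf f l = 0 ∨ ∃ x ∈ l, pvMaxOf f l = f x := by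
  have h : pvMaxOf f l = (l.map f).foldl max 0 := by
    simp [pvMaxOf, List.foldl_map]
  rcases PySem.List.foldl_max_mem (l.map f) 0 with h0 | hm
  · exact Or.inl (h ▸ h0)
  · rcases List.mem_map.1 hm with ⟨x, hx, hfx⟩
    refine Or.inr ⟨x, hx, ?_⟩
    rw [h]; exact hfx.symm

theorem pvMaxOf_subset_le (f : Char → Int) {l₁ l₂ : List Char}
    (h : ∀ x ∈ l₁, x ∈ l₂) : pvMaxOf f l₁ ≤ pvMaxOf f l₂ := by
  rcases pvMaxOf_mem f l₁ with h0 | ⟨x, hx, hfx⟩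
  · exact h0 ▸ pvMaxOf_nonneg f l₂
  · exact hfx ▸ pvMaxOf_le f l₂ (h x hx)

theorem pvMaxOf_congr_mem (f : Char → Int) {l₁ l₂ : List Char}
    (h : ∀ x, x ∈ l₁ ↔ x ∈ l₂) : pvMaxOf f l₁ = pvMaxOf f l₂ :=
  le_antisymm (pvMaxOf_subset_le f fun x hx => (h x).1 hx)
    (pvMaxOf_subset_le f fun x hx => (h x).2 hx)

-- A's branch-and-scan over lista1, abstracted over the already-filtered list
theorem portA_core (s l1 : List Char)
    (h : l1 = s.filter (fun e => decide (PySem.List.count s e > 1))) :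
    (if l1 = [] then (0 : Int)
     else
       l1.foldl
         (fun m letter =>
           let count : Int := (PySem.List.count l1 letter : Int)
           if count > m then count else m)
         0) =
      pvMaxOf (fun x => (s.count x : Int))
        (s.filter (fun e => PySem.List.count s e > 1)) := by
  subst h
  set l1 := s.filter (fun e => decide (PySem.List.count s e > 1)) with hl1
  by_cases hnil : l1 = []
  · simp [hnil, pvMaxOf]
  · simp only [if_neg hnil]
    have hstep : l1.foldl
        (fun m letter =>
          let count : Int := (PySem.List.count l1 letter : Int)
          if count > m then count else m) 0 =
        l1.foldl (fun m x => max m ((s.count x : Int))) 0 := by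
      apply PySem.List.foldl_congr_mem
      intro acc x hx
      have hcnt : l1.count x = s.count x := by
        have hpx : decide (PySem.List.count s x > 1) = true := (List.mem_filter.1 hx).2
        rw [hl1, List.count_filter]
        simp only [PySem.List.count] at hpx
        simp [of_decide_eq_true hpx]
      simp only [PySem.List.count, hcnt]
      split_ifs with h <;> omega
    rw [hstep]; rfl

-- A computes the running max of s.count over the repeated characters of s (with multiplicity)
theorem portA_eq (cadena : String) :
    contar_caracteres_repetidos cadena =
      pvMaxOf (fun x => (cadena.toList.count x : Int))
        (cadena.toList.filter (fun e => PySem.List.count cadena.toList e > 1)) := by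
  simp only [contar_caracteres_repetidos]
  rw [PySem.List.foldl_pyRange_zero_pyGetD cadena.toList ' ' (fun l x => l ++ [x]) []]
  rw [PySem.List.foldl_append_singleton_eq_self]
  simp only [List.nil_append]
  refine portA_core cadena.toList _ ?_
  have h := PySem.List.foldl_append_ite_eq_filter
    (p := fun e => PySem.List.count cadena.toList e > 1) cadena.toList []
  simpa using h

-- B computes the running max of s.count over the distinct repeated characters of s
theorem portB_eq (cadena : String) :
    contar_caracteres_repetidos_alt cadena =
      pvMaxOf (fun x => (cadena.toList.count x : Int))
        ((PySem.List.dedup cadena.toList).filter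
          (fun e => PySem.List.count cadena.toList e > 1)) := by
  simp only [contar_caracteres_repetidos_alt]
  set s := cadena.toList with hs
  rw [PySem.Dict.foldl_insert_getD_add_one_eq_counter]
  have hvals : (PySem.Dict.counter s).values =
      (PySem.Set.ofList s).map (fun k => ((s.count k : Int))) := by
    show ((PySem.Dict.counter s).items.map (·.2)) = _
    rw [PySem.Dict.items_counter]
    simp [List.map_map, Function.comp]
  rw [hvals]
  have hstep : ∀ (l : List Char),
      (l.map (fun k => ((s.count k : Int)))).foldl
        (fun best v => if v > 1 ∧ v > best then v else best) 0 =
      pvMaxOf (fun x => ((s.count x : Int)))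
        (l.filter (fun e => PySem.List.count s e > 1)) := by
    intro l
    rw [List.foldl_map]
    have hcongr : l.foldl
        (fun best k => if ((s.count k : Int)) > 1 ∧ ((s.count k : Int)) > best then ((s.count k : Int)) else best) 0 =
        l.foldl
        (fun best k => if PySem.List.count s k > 1 then max best ((s.count k : Int)) else best) 0 := by
      apply PySem.List.foldl_congr_mem
      intro acc x _
      simp only [PySem.List.count]
      split_ifs with h1 h2 h3 <;> omega
    rw [hcongr, PySem.List.foldl_ite_eq_foldl_filter]
    rfl
  rw [hstep (PySem.Set.ofList s)]
  simp [pvMaxOf]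

-- ===== VERDICT (by name: the statement is the Claim_ definition above) =====
theorem contar_caracteres_repetidos_spec : Claim_equal_contar_caracteres_repetidos := by
  intro cadena _
  show contar_caracteres_repetidos cadena = contar_caracteres_repetidos_alt cadena
  rw [portA_eq, portB_eq]
  apply pvMaxOf_congr_mem
  intro x
  simp [List.mem_filter, PySem.List.dedup_eq_ofList, PySem.Set.mem_ofList]
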